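-- pv_equiv track=rewrite | github.com/andrewcho-dev/opsconductor-monitor | backend/utils/platform_validator.py | is_platform_compatible
-- ===== SOURCE A (Python) =====
-- from typing import Dict, Any, List, Optional, Set
--
-- class Platforms:
--     LINUX = 'linux'
--     WINDOWS = 'windows'
--     MACOS = 'macos'
--     UNIX = 'unix'
--     CISCO_IOS = 'cisco-ios'
--     CISCO_NXOS = 'cisco-nxos'
--     CISCO_ASA = 'cisco-asa'
--     JUNIPER_JUNOS = 'juniper-junos'
--     ARISTA_EOS = 'arista-eos'
--     CIENA_SAOS = 'ciena-saos'
--     PALOALTO_PANOS = 'paloalto-panos'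
--     FORTINET_FORTIOS = 'fortinet-fortios'
--     MIKROTIK_ROUTEROS = 'mikrotik-routeros'
--     UBIQUITI_UNIFI = 'ubiquiti-unifi'
--     HPE_ARUBA = 'hpe-aruba'
--     DELL_OS10 = 'dell-os10'
--     AXIS_CAMERA = 'axis-camera'
--     GENERIC_CAMERA = 'generic-camera'
--     NETWORK_DEVICE = 'network-device'
--     ANY = 'any'
--
-- PLATFORM_COMPATIBILITY = {
--     Platforms.LINUX: {Platforms.UNIX},
--     Platforms.MACOS: {Platforms.UNIX},
--     Platforms.UNIX: {Platforms.LINUX, Platforms.MACOS},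
--     Platforms.CISCO_IOS: {Platforms.NETWORK_DEVICE},
--     Platforms.CISCO_NXOS: {Platforms.NETWORK_DEVICE},
--     Platforms.CISCO_ASA: {Platforms.NETWORK_DEVICE},
--     Platforms.JUNIPER_JUNOS: {Platforms.NETWORK_DEVICE},
--     Platforms.ARISTA_EOS: {Platforms.NETWORK_DEVICE},
--     Platforms.CIENA_SAOS: {Platforms.NETWORK_DEVICE},
--     Platforms.PALOALTO_PANOS: {Platforms.NETWORK_DEVICE},
--     Platforms.FORTINET_FORTIOS: {Platforms.NETWORK_DEVICE},
--     Platforms.MIKROTIK_ROUTEROS: {Platforms.NETWORK_DEVICE},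
--     Platforms.UBIQUITI_UNIFI: {Platforms.NETWORK_DEVICE},
--     Platforms.HPE_ARUBA: {Platforms.NETWORK_DEVICE},
--     Platforms.DELL_OS10: {Platforms.NETWORK_DEVICE},
--     Platforms.AXIS_CAMERA: {Platforms.GENERIC_CAMERA},
-- }
--
-- def is_platform_compatible(node_platforms: List[str], device_platform: str) -> bool:
--     """
--     Check if a device platform is compatible with a node's supported platforms.
--
--     Args:
--         node_platforms: List of platforms the node supports
--         device_platform: The platform of the target device
--
--     Returns:
--         True if compatible, False otherwise
--     """
--     # If node supports any platform, always compatible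
--     if Platforms.ANY in node_platforms:
--         return True
--
--     # If device platform is unknown, assume compatible (let it fail at runtime)
--     if not device_platform:
--         return True
--
--     # Normalize platform string
--     device_platform = device_platform.lower().strip()
--
--     # Direct match
--     if device_platform in node_platforms:
--         return True
--
--     # Check compatibility mappings
--     for node_platform in node_platforms:
--         compatible_with = PLATFORM_COMPATIBILITY.get(node_platform, set())
--         if device_platform in compatible_with:
--             return True
--
--         # Reverse check - device platform is compatible with node platform
--         device_compatible_with = PLATFORM_COMPATIBILITY.get(device_platform, set())
--         if node_platform in device_compatible_with:
--             return True
--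
--     return False
-- ===== SOURCE B (Python) =====
-- PLATFORM_COMPATIBILITY = {
--     'linux': {'unix'},
--     'macos': {'unix'},
--     'unix': {'linux', 'macos'},
--     'cisco-ios': {'network-device'},
--     'cisco-nxos': {'network-device'},
--     'cisco-asa': {'network-device'},
--     'juniper-junos': {'network-device'},
--     'arista-eos': {'network-device'},
--     'ciena-saos': {'network-device'},
--     'paloalto-panos': {'network-device'},
--     'fortinet-fortios': {'network-device'},
--     'mikrotik-routeros': {'network-device'},
--     'ubiquiti-unifi': {'network-device'},
--     'hpe-aruba': {'network-device'},
--     'dell-os10': {'network-device'},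
--     'axis-camera': {'generic-camera'},
-- }
--
-- # Reverse index of PLATFORM_COMPATIBILITY: maps each value to the set of keys listing it.
-- REVERSE_COMPATIBILITY = {
--     'unix': {'linux', 'macos'},
--     'linux': {'unix'},
--     'macos': {'unix'},
--     'network-device': {'cisco-ios', 'cisco-nxos', 'cisco-asa', 'juniper-junos',
--                        'arista-eos', 'ciena-saos', 'paloalto-panos', 'fortinet-fortios',
--                        'mikrotik-routeros', 'ubiquiti-unifi', 'hpe-aruba', 'dell-os10'},
--     'generic-camera': {'axis-camera'},
-- }
--
--
-- def is_platform_compatible(node_platforms, device_platform):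
--     if 'any' in node_platforms:
--         return True
--     if not device_platform:
--         return True
--     device_platform = device_platform.lower().strip()
--     accepted = ({device_platform}
--                 | PLATFORM_COMPATIBILITY.get(device_platform, set())
--                 | REVERSE_COMPATIBILITY.get(device_platform, set()))
--     return bool(accepted & set(node_platforms))
-- ===== Notes on version B (the rewrite author's own statement) =====
-- stated objective: simpler
-- what changed: Replaces A's per-node-platform loop doing two dict lookups per element with a precomputed reverse index of PLATFORM_COMPATIBILITY: after normalization one accepted set ({device} | forward[device] | reverse[device]) is built from two O(1) lookups and intersected once with the node platforms.
import Mathlib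
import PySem

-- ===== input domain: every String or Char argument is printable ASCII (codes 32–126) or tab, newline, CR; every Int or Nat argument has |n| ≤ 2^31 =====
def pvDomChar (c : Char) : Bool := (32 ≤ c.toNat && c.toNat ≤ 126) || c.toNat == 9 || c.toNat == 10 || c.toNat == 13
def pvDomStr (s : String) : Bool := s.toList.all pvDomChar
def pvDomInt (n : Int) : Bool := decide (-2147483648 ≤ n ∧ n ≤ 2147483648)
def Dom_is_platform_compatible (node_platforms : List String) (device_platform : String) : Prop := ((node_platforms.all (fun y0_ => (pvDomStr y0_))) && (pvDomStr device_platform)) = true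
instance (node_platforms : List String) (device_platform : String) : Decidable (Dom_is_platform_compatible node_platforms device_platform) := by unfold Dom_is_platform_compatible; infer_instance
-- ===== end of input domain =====

-- B replaces A's per-node-platform scan (two dict lookups per element) with a precomputed
-- reverse index of PLATFORM_COMPATIBILITY and a single set intersection; objective: simpler.

-- ===== PORT A =====
-- PLATFORM_COMPATIBILITY (its values are Python sets, used only for membership tests)
def pcTable : PySem.Dict String (PySem.Set String) := PySem.Dict.ofList [
  ("linux", ["unix"]),
  ("macos", ["unix"]),
  ("unix", ["linux", "macos"]),
  ("cisco-ios", ["network-device"]),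
  ("cisco-nxos", ["network-device"]),
  ("cisco-asa", ["network-device"]),
  ("juniper-junos", ["network-device"]),
  ("arista-eos", ["network-device"]),
  ("ciena-saos", ["network-device"]),
  ("paloalto-panos", ["network-device"]),
  ("fortinet-fortios", ["network-device"]),
  ("mikrotik-routeros", ["network-device"]),
  ("ubiquiti-unifi", ["network-device"]),
  ("hpe-aruba", ["network-device"]),
  ("dell-os10", ["network-device"]),
  ("axis-camera", ["generic-camera"])]

-- A's final 'for node_platform in node_platforms:' loop
def pcLoop (d : String) : List String → Bool
  | [] => false
  | np :: rest =>
    let compatible_with := PySem.Dict.getD pcTable np []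
    if PySem.Set.contains compatible_with d then true
    else
      let device_compatible_with := PySem.Dict.getD pcTable d []
      if PySem.Set.contains device_compatible_with np then true
      else pcLoop d rest

def is_platform_compatible (node_platforms : List String) (device_platform : String) : Bool :=
  if node_platforms.contains "any" then true
  else if device_platform = "" then true
  else
    let d := PySem.Str.strip (PySem.Str.lower device_platform)
    if node_platforms.contains d then true
    else pcLoop d node_platforms

-- ===== PORT B =====
-- REVERSE_COMPATIBILITY: literal reverse index of PLATFORM_COMPATIBILITY, as in Source B
def revTable : PySem.Dict String (PySem.Set String) := PySem.Dict.ofList [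
  ("unix", ["linux", "macos"]),
  ("linux", ["unix"]),
  ("macos", ["unix"]),
  ("network-device", ["cisco-ios", "cisco-nxos", "cisco-asa", "juniper-junos", "arista-eos", "ciena-saos", "paloalto-panos", "fortinet-fortios", "mikrotik-routeros", "ubiquiti-unifi", "hpe-aruba", "dell-os10"]),
  ("generic-camera", ["axis-camera"])]

def is_platform_compatible_alt (node_platforms : List String) (device_platform : String) : Bool :=
  if node_platforms.contains "any" then true
  else if device_platform = "" then true
  else
    let d := PySem.Str.strip (PySem.Str.lower device_platform)
    let accepted := PySem.Set.union (PySem.Set.union (PySem.Set.ofList [d])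
                      (PySem.Dict.getD pcTable d [])) (PySem.Dict.getD revTable d [])
    !(PySem.Set.inter accepted (PySem.Set.ofList node_platforms)).isEmpty

-- ===== PRECONDITION & SPEC =====
def Spec_is_platform_compatible (node_platforms : List String) (device_platform : String) (out : Bool) : Prop := out = is_platform_compatible_alt node_platforms device_platform
instance (node_platforms : List String) (device_platform : String) (out : Bool) : Decidable (Spec_is_platform_compatible node_platforms device_platform out) := by unfold Spec_is_platform_compatible; infer_instance

-- ===== CLAIM (what is proved, stated in full; the proofs are below) =====
def Claim_equal_is_platform_compatible : Prop := ∀ (node_platforms : List String) (device_platform : String), Dom_is_platform_compatible node_platforms device_platform → Spec_is_platform_compatible node_platforms device_platform (is_platform_compatible node_platforms device_platform)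

-- ===== LEMMAS AND PROOFS =====
set_option maxHeartbeats 1600000

-- the two tables written as explicit if-chains, to reason about lookups on arbitrary keys
def pcF (k : String) : List String :=
  if k = "linux" then ["unix"]
  else if k = "macos" then ["unix"]
  else if k = "unix" then ["linux", "macos"]
  else if k = "cisco-ios" then ["network-device"]
  else if k = "cisco-nxos" then ["network-device"]
  else if k = "cisco-asa" then ["network-device"]
  else if k = "juniper-junos" then ["network-device"]
  else if k = "arista-eos" then ["network-device"]
  else if k = "ciena-saos" then ["network-device"]
  else if k = "paloalto-panos" then ["network-device"]
  else if k = "fortinet-fortios" then ["network-device"]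
  else if k = "mikrotik-routeros" then ["network-device"]
  else if k = "ubiquiti-unifi" then ["network-device"]
  else if k = "hpe-aruba" then ["network-device"]
  else if k = "dell-os10" then ["network-device"]
  else if k = "axis-camera" then ["generic-camera"]
  else []

def revF (k : String) : List String :=
  if k = "unix" then ["linux", "macos"]
  else if k = "linux" then ["unix"]
  else if k = "macos" then ["unix"]
  else if k = "network-device" then ["cisco-ios", "cisco-nxos", "cisco-asa", "juniper-junos", "arista-eos", "ciena-saos", "paloalto-panos", "fortinet-fortios", "mikrotik-routeros", "ubiquiti-unifi", "hpe-aruba", "dell-os10"]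
  else if k = "generic-camera" then ["axis-camera"]
  else []

lemma getD_pc (k : String) : PySem.Dict.getD pcTable k [] = pcF k := by
  have h1 : pcTable = PySem.Dict.mk [
    ("linux", ["unix"]),
    ("macos", ["unix"]),
    ("unix", ["linux", "macos"]),
    ("cisco-ios", ["network-device"]),
    ("cisco-nxos", ["network-device"]),
    ("cisco-asa", ["network-device"]),
    ("juniper-junos", ["network-device"]),
    ("arista-eos", ["network-device"]),
    ("ciena-saos", ["network-device"]),
    ("paloalto-panos", ["network-device"]),
    ("fortinet-fortios", ["network-device"]),
    ("mikrotik-routeros", ["network-device"]),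
    ("ubiquiti-unifi", ["network-device"]),
    ("hpe-aruba", ["network-device"]),
    ("dell-os10", ["network-device"]),
    ("axis-camera", ["generic-camera"])] := by rfl
  rw [h1]
  unfold pcF
  simp only [PySem.Dict.getD, PySem.Dict.get?_mk_cons, beq_iff_eq]
  by_cases e0 : k = "linux"
  case pos => subst e0; decide
  rw [if_neg (fun h => e0 h.symm), if_neg e0]
  by_cases e1 : k = "macos"
  case pos => subst e1; decide
  rw [if_neg (fun h => e1 h.symm), if_neg e1]
  by_cases e2 : k = "unix"
  case pos => subst e2; decide
  rw [if_neg (fun h => e2 h.symm), if_neg e2]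
  by_cases e3 : k = "cisco-ios"
  case pos => subst e3; decide
  rw [if_neg (fun h => e3 h.symm), if_neg e3]
  by_cases e4 : k = "cisco-nxos"
  case pos => subst e4; decide
  rw [if_neg (fun h => e4 h.symm), if_neg e4]
  by_cases e5 : k = "cisco-asa"
  case pos => subst e5; decide
  rw [if_neg (fun h => e5 h.symm), if_neg e5]
  by_cases e6 : k = "juniper-junos"
  case pos => subst e6; decide
  rw [if_neg (fun h => e6 h.symm), if_neg e6]
  by_cases e7 : k = "arista-eos"
  case pos => subst e7; decide
  rw [if_neg (fun h => e7 h.symm), if_neg e7]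
  by_cases e8 : k = "ciena-saos"
  case pos => subst e8; decide
  rw [if_neg (fun h => e8 h.symm), if_neg e8]
  by_cases e9 : k = "paloalto-panos"
  case pos => subst e9; decide
  rw [if_neg (fun h => e9 h.symm), if_neg e9]
  by_cases e10 : k = "fortinet-fortios"
  case pos => subst e10; decide
  rw [if_neg (fun h => e10 h.symm), if_neg e10]
  by_cases e11 : k = "mikrotik-routeros"
  case pos => subst e11; decide
  rw [if_neg (fun h => e11 h.symm), if_neg e11]
  by_cases e12 : k = "ubiquiti-unifi"
  case pos => subst e12; decide
  rw [if_neg (fun h => e12 h.symm), if_neg e12]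
  by_cases e13 : k = "hpe-aruba"
  case pos => subst e13; decide
  rw [if_neg (fun h => e13 h.symm), if_neg e13]
  by_cases e14 : k = "dell-os10"
  case pos => subst e14; decide
  rw [if_neg (fun h => e14 h.symm), if_neg e14]
  by_cases e15 : k = "axis-camera"
  case pos => subst e15; decide
  rw [if_neg (fun h => e15 h.symm), if_neg e15]
  rfl

lemma getD_rev (k : String) : PySem.Dict.getD revTable k [] = revF k := by
  have h1 : revTable = PySem.Dict.mk [
    ("unix", ["linux", "macos"]),
    ("linux", ["unix"]),
    ("macos", ["unix"]),
    ("network-device", ["cisco-ios", "cisco-nxos", "cisco-asa", "juniper-junos", "arista-eos", "ciena-saos", "paloalto-panos", "fortinet-fortios", "mikrotik-routeros", "ubiquiti-unifi", "hpe-aruba", "dell-os10"]),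
    ("generic-camera", ["axis-camera"])] := by rfl
  rw [h1]
  unfold revF
  simp only [PySem.Dict.getD, PySem.Dict.get?_mk_cons, beq_iff_eq]
  by_cases e0 : k = "unix"
  case pos => subst e0; decide
  rw [if_neg (fun h => e0 h.symm), if_neg e0]
  by_cases e1 : k = "linux"
  case pos => subst e1; decide
  rw [if_neg (fun h => e1 h.symm), if_neg e1]
  by_cases e2 : k = "macos"
  case pos => subst e2; decide
  rw [if_neg (fun h => e2 h.symm), if_neg e2]
  by_cases e3 : k = "network-device"
  case pos => subst e3; decide
  rw [if_neg (fun h => e3 h.symm), if_neg e3]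
  by_cases e4 : k = "generic-camera"
  case pos => subst e4; decide
  rw [if_neg (fun h => e4 h.symm), if_neg e4]
  rfl

-- the reverse index really inverts the forward table
lemma mem_rev_iff (d np : String) :
    np ∈ PySem.Dict.getD revTable d [] ↔ d ∈ PySem.Dict.getD pcTable np [] := by
  rw [getD_rev, getD_pc]
  simp only [pcF, revF]
  by_cases d0 : d = "unix"
  case pos =>
    subst d0
    by_cases n0 : np = "linux"
    case pos => subst n0; decide
    by_cases n1 : np = "macos"
    case pos => subst n1; decide
    by_cases n2 : np = "unix"
    case pos => subst n2; decide
    by_cases n3 : np = "cisco-ios"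
    case pos => subst n3; decide
    by_cases n4 : np = "cisco-nxos"
    case pos => subst n4; decide
    by_cases n5 : np = "cisco-asa"
    case pos => subst n5; decide
    by_cases n6 : np = "juniper-junos"
    case pos => subst n6; decide
    by_cases n7 : np = "arista-eos"
    case pos => subst n7; decide
    by_cases n8 : np = "ciena-saos"
    case pos => subst n8; decide
    by_cases n9 : np = "paloalto-panos"
    case pos => subst n9; decide
    by_cases n10 : np = "fortinet-fortios"
    case pos => subst n10; decide
    by_cases n11 : np = "mikrotik-routeros"
    case pos => subst n11; decide
    by_cases n12 : np = "ubiquiti-unifi"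
    case pos => subst n12; decide
    by_cases n13 : np = "hpe-aruba"
    case pos => subst n13; decide
    by_cases n14 : np = "dell-os10"
    case pos => subst n14; decide
    by_cases n15 : np = "axis-camera"
    case pos => subst n15; decide
    simp [n0, n1, n2, n3, n4, n5, n6, n7, n8, n9, n10, n11, n12, n13, n14, n15]
  by_cases d1 : d = "linux"
  case pos =>
    subst d1
    by_cases n0 : np = "linux"
    case pos => subst n0; decide
    by_cases n1 : np = "macos"
    case pos => subst n1; decide
    by_cases n2 : np = "unix"
    case pos => subst n2; decide
    by_cases n3 : np = "cisco-ios"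
    case pos => subst n3; decide
    by_cases n4 : np = "cisco-nxos"
    case pos => subst n4; decide
    by_cases n5 : np = "cisco-asa"
    case pos => subst n5; decide
    by_cases n6 : np = "juniper-junos"
    case pos => subst n6; decide
    by_cases n7 : np = "arista-eos"
    case pos => subst n7; decide
    by_cases n8 : np = "ciena-saos"
    case pos => subst n8; decide
    by_cases n9 : np = "paloalto-panos"
    case pos => subst n9; decide
    by_cases n10 : np = "fortinet-fortios"
    case pos => subst n10; decide
    by_cases n11 : np = "mikrotik-routeros"
    case pos => subst n11; decide
    by_cases n12 : np = "ubiquiti-unifi"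
    case pos => subst n12; decide
    by_cases n13 : np = "hpe-aruba"
    case pos => subst n13; decide
    by_cases n14 : np = "dell-os10"
    case pos => subst n14; decide
    by_cases n15 : np = "axis-camera"
    case pos => subst n15; decide
    simp [n0, n1, n2, n3, n4, n5, n6, n7, n8, n9, n10, n11, n12, n13, n14, n15]
  by_cases d2 : d = "macos"
  case pos =>
    subst d2
    by_cases n0 : np = "linux"
    case pos => subst n0; decide
    by_cases n1 : np = "macos"
    case pos => subst n1; decide
    by_cases n2 : np = "unix"
    case pos => subst n2; decide
    by_cases n3 : np = "cisco-ios"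
    case pos => subst n3; decide
    by_cases n4 : np = "cisco-nxos"
    case pos => subst n4; decide
    by_cases n5 : np = "cisco-asa"
    case pos => subst n5; decide
    by_cases n6 : np = "juniper-junos"
    case pos => subst n6; decide
    by_cases n7 : np = "arista-eos"
    case pos => subst n7; decide
    by_cases n8 : np = "ciena-saos"
    case pos => subst n8; decide
    by_cases n9 : np = "paloalto-panos"
    case pos => subst n9; decide
    by_cases n10 : np = "fortinet-fortios"
    case pos => subst n10; decide
    by_cases n11 : np = "mikrotik-routeros"
    case pos => subst n11; decide
    by_cases n12 : np = "ubiquiti-unifi"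
    case pos => subst n12; decide
    by_cases n13 : np = "hpe-aruba"
    case pos => subst n13; decide
    by_cases n14 : np = "dell-os10"
    case pos => subst n14; decide
    by_cases n15 : np = "axis-camera"
    case pos => subst n15; decide
    simp [n0, n1, n2, n3, n4, n5, n6, n7, n8, n9, n10, n11, n12, n13, n14, n15]
  by_cases d3 : d = "network-device"
  case pos =>
    subst d3
    by_cases n0 : np = "linux"
    case pos => subst n0; decide
    by_cases n1 : np = "macos"
    case pos => subst n1; decide
    by_cases n2 : np = "unix"
    case pos => subst n2; decide
    by_cases n3 : np = "cisco-ios"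
    case pos => subst n3; decide
    by_cases n4 : np = "cisco-nxos"
    case pos => subst n4; decide
    by_cases n5 : np = "cisco-asa"
    case pos => subst n5; decide
    by_cases n6 : np = "juniper-junos"
    case pos => subst n6; decide
    by_cases n7 : np = "arista-eos"
    case pos => subst n7; decide
    by_cases n8 : np = "ciena-saos"
    case pos => subst n8; decide
    by_cases n9 : np = "paloalto-panos"
    case pos => subst n9; decide
    by_cases n10 : np = "fortinet-fortios"
    case pos => subst n10; decide
    by_cases n11 : np = "mikrotik-routeros"
    case pos => subst n11; decide
    by_cases n12 : np = "ubiquiti-unifi"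
    case pos => subst n12; decide
    by_cases n13 : np = "hpe-aruba"
    case pos => subst n13; decide
    by_cases n14 : np = "dell-os10"
    case pos => subst n14; decide
    by_cases n15 : np = "axis-camera"
    case pos => subst n15; decide
    simp [n0, n1, n2, n3, n4, n5, n6, n7, n8, n9, n10, n11, n12, n13, n14, n15]
  by_cases d4 : d = "generic-camera"
  case pos =>
    subst d4
    by_cases n0 : np = "linux"
    case pos => subst n0; decide
    by_cases n1 : np = "macos"
    case pos => subst n1; decide
    by_cases n2 : np = "unix"
    case pos => subst n2; decide
    by_cases n3 : np = "cisco-ios"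
    case pos => subst n3; decide
    by_cases n4 : np = "cisco-nxos"
    case pos => subst n4; decide
    by_cases n5 : np = "cisco-asa"
    case pos => subst n5; decide
    by_cases n6 : np = "juniper-junos"
    case pos => subst n6; decide
    by_cases n7 : np = "arista-eos"
    case pos => subst n7; decide
    by_cases n8 : np = "ciena-saos"
    case pos => subst n8; decide
    by_cases n9 : np = "paloalto-panos"
    case pos => subst n9; decide
    by_cases n10 : np = "fortinet-fortios"
    case pos => subst n10; decide
    by_cases n11 : np = "mikrotik-routeros"
    case pos => subst n11; decide
    by_cases n12 : np = "ubiquiti-unifi"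
    case pos => subst n12; decide
    by_cases n13 : np = "hpe-aruba"
    case pos => subst n13; decide
    by_cases n14 : np = "dell-os10"
    case pos => subst n14; decide
    by_cases n15 : np = "axis-camera"
    case pos => subst n15; decide
    simp [n0, n1, n2, n3, n4, n5, n6, n7, n8, n9, n10, n11, n12, n13, n14, n15]
  by_cases n0 : np = "linux"
  case pos => subst n0; simp [d0, d1, d2, d3, d4]
  by_cases n1 : np = "macos"
  case pos => subst n1; simp [d0, d1, d2, d3, d4]
  by_cases n2 : np = "unix"
  case pos => subst n2; simp [d0, d1, d2, d3, d4]
  by_cases n3 : np = "cisco-ios"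
  case pos => subst n3; simp [d0, d1, d2, d3, d4]
  by_cases n4 : np = "cisco-nxos"
  case pos => subst n4; simp [d0, d1, d2, d3, d4]
  by_cases n5 : np = "cisco-asa"
  case pos => subst n5; simp [d0, d1, d2, d3, d4]
  by_cases n6 : np = "juniper-junos"
  case pos => subst n6; simp [d0, d1, d2, d3, d4]
  by_cases n7 : np = "arista-eos"
  case pos => subst n7; simp [d0, d1, d2, d3, d4]
  by_cases n8 : np = "ciena-saos"
  case pos => subst n8; simp [d0, d1, d2, d3, d4]
  by_cases n9 : np = "paloalto-panos"
  case pos => subst n9; simp [d0, d1, d2, d3, d4]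
  by_cases n10 : np = "fortinet-fortios"
  case pos => subst n10; simp [d0, d1, d2, d3, d4]
  by_cases n11 : np = "mikrotik-routeros"
  case pos => subst n11; simp [d0, d1, d2, d3, d4]
  by_cases n12 : np = "ubiquiti-unifi"
  case pos => subst n12; simp [d0, d1, d2, d3, d4]
  by_cases n13 : np = "hpe-aruba"
  case pos => subst n13; simp [d0, d1, d2, d3, d4]
  by_cases n14 : np = "dell-os10"
  case pos => subst n14; simp [d0, d1, d2, d3, d4]
  by_cases n15 : np = "axis-camera"
  case pos => subst n15; simp [d0, d1, d2, d3, d4]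
  simp [d0, d1, d2, d3, d4, n0, n1, n2, n3, n4, n5, n6, n7, n8, n9, n10, n11, n12, n13, n14, n15]

-- A's loop is the existential, over node_platforms, of the two membership tests
lemma pcLoop_eq_any (d : String) (L : List String) :
    pcLoop d L = L.any (fun np =>
      PySem.Set.contains (PySem.Dict.getD pcTable np []) d ||
      PySem.Set.contains (PySem.Dict.getD pcTable d []) np) := by
  induction L with
  | nil => rfl
  | cons np rest ih =>
    simp only [pcLoop, List.any_cons, ← ih]
    by_cases h1 : PySem.Set.contains (PySem.Dict.getD pcTable np []) d <;>
      by_cases h2 : PySem.Set.contains (PySem.Dict.getD pcTable d []) np <;>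
      simp [Bool.or_assoc]

theorem main_eq (L : List String) (dev : String) :
    is_platform_compatible L dev = is_platform_compatible_alt L dev := by
  unfold is_platform_compatible is_platform_compatible_alt
  by_cases hany : L.contains "any" = true
  · rw [if_pos hany, if_pos hany]
  · by_cases hemp : dev = ""
    · simp [hemp]
    · simp only [hany, hemp, Bool.false_eq_true, if_false]
      rw [Bool.eq_iff_iff]
      by_cases hd : L.contains (PySem.Str.strip (PySem.Str.lower dev)) = true <;>
        simp only [hd, pcLoop_eq_any, if_true, if_false, Bool.false_eq_true] <;>
        simp only [List.any_eq_true, PySem.Set.contains_iff, Bool.or_eq_true,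
          Bool.not_eq_true', List.isEmpty_eq_false_iff_exists_mem, PySem.Set.mem_inter,
          PySem.Set.mem_union, PySem.Set.mem_ofList, List.mem_singleton, mem_rev_iff]
      · rw [List.contains_iff_mem] at hd
        constructor
        · intro _
          exact ⟨PySem.Str.strip (PySem.Str.lower dev), Or.inl (Or.inl rfl), hd⟩
        · intro _; trivial
      · constructor
        · rintro ⟨np, hnp, hcase⟩
          rcases hcase with h | h
          · exact ⟨np, Or.inr h, hnp⟩
          · exact ⟨np, Or.inl (Or.inr h), hnp⟩
        · rintro ⟨x, hx, hxL⟩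
          rcases hx with (rfl | h) | h
          · rw [← List.contains_iff_mem] at hxL
            exact absurd hxL hd
          · exact ⟨x, hxL, Or.inr h⟩
          · exact ⟨x, hxL, Or.inl h⟩

-- ===== VERDICT (by name: the statement is the Claim_ definition above) =====
theorem is_platform_compatible_spec : Claim_equal_is_platform_compatible := by
  intro L dev _
  unfold Spec_is_platform_compatible
  exact main_eq L dev
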